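-- pv_equiv track=rewrite | github.com/bberrium/Battleship-Game | src/ship_input.py | validate_ship_shape
-- ===== SOURCE A (Python) =====
-- from typing import List, Tuple, Set
--
-- def validate_ship_shape(coords: List[Tuple[int, int]], expected_size: int) -> bool:
--     """Validate ship is a straight horizontal or vertical line of correct size"""
--     if len(coords) != expected_size:
--         return False
--
--     if expected_size == 1:
--         return True
--
--     # Remove duplicates and sort
--     coords = sorted(list(set(coords)))
--
--     if len(coords) != expected_size:
--         return False
--
--     rows = [c[0] for c in coords]
--     cols = [c[1] for c in coords]
--
--     # Check if horizontal (same row, consecutive columns)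
--     if len(set(rows)) == 1:
--         return cols == list(range(min(cols), max(cols) + 1))
--
--     # Check if vertical (same column, consecutive rows)
--     if len(set(cols)) == 1:
--         return rows == list(range(min(rows), max(rows) + 1))
--
--     return False
-- ===== SOURCE B (Python) =====
-- def validate_ship_shape(coords, expected_size):
--     """Validate ship is a straight horizontal or vertical line of correct size
--     (span arithmetic on the distinct rows/columns instead of sort + range comparison)."""
--     if len(coords) != expected_size:
--         return False
--     if expected_size == 1:
--         return True
--     s = set(coords)
--     if len(s) != expected_size:
--         return False
--     rows = {r for r, _ in s}
--     cols = {c for _, c in s}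
--     if len(rows) == 1:
--         return max(cols) - min(cols) == expected_size - 1
--     if len(cols) == 1:
--         return max(rows) - min(rows) == expected_size - 1
--     return False
-- ===== Notes on version B (the rewrite author's own statement) =====
-- stated objective: simpler
-- what changed: B drops A's sort of the deduplicated coordinates and the construction of a full range() list, checking straightness and contiguity with an O(n) span test (max - min == expected_size - 1) over the distinct rows/columns.
import Mathlib
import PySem

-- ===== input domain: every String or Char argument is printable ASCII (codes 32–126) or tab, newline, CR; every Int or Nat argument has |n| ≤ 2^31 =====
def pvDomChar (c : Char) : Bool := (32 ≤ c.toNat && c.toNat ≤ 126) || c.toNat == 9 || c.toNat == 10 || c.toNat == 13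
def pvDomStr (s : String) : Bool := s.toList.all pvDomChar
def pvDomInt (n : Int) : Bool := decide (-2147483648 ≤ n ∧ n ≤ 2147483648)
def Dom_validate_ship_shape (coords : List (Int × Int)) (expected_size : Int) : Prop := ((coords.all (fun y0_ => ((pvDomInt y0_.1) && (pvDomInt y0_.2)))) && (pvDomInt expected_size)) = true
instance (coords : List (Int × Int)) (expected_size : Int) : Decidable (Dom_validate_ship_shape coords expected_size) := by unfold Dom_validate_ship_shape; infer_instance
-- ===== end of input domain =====

-- B replaces A's sort-the-set-and-compare-with-range check by an O(n) span check
-- (max - min = size - 1) over the distinct rows/columns: simpler, no sorting.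


-- ===== PORT A =====
-- Literal port of A: length/size-1 guards, coords = sorted(set(coords)), rows/cols
-- projections, then 'cols == list(range(min(cols), max(cols)+1))' (resp. rows).
-- Python's min/max on a list raise on []; those branches are only reached with a
-- nonempty list (the set of rows/cols has length 1), so the 'none' fallback is dead.
def validate_ship_shape (coords : List (Int × Int)) (expected_size : Int) : Bool :=
  if (coords.length : Int) ≠ expected_size then false
  else if expected_size = 1 then true
  else
    let coords2 := PySem.List.sorted2 (PySem.Set.ofList coords) (fun c => c.1) (fun c => c.2)
    if (coords2.length : Int) ≠ expected_size then false
    else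
      let rows := coords2.map (fun c => c.1)
      let cols := coords2.map (fun c => c.2)
      if (PySem.Set.ofList rows).length = 1 then
        match PySem.List.min? cols (fun x => x), PySem.List.max? cols (fun x => x) with
        | some mn, some mx => decide (cols = PySem.List.pyRange mn (mx + 1) 1)
        | _, _ => false
      else if (PySem.Set.ofList cols).length = 1 then
        match PySem.List.min? rows (fun x => x), PySem.List.max? rows (fun x => x) with
        | some mn, some mx => decide (rows = PySem.List.pyRange mn (mx + 1) 1)
        | _, _ => false
      else false

-- ===== PORT B =====
-- Literal port of B (Source B): set of coords, distinct rows/cols as sets, span check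
-- max - min = expected_size - 1; same dead 'none' fallback for min/max on [].
def validate_ship_shape_alt (coords : List (Int × Int)) (expected_size : Int) : Bool :=
  if (coords.length : Int) ≠ expected_size then false
  else if expected_size = 1 then true
  else
    let s := PySem.Set.ofList coords
    if (s.length : Int) ≠ expected_size then false
    else
      let rows := PySem.Set.ofList (s.map (fun c => c.1))
      let cols := PySem.Set.ofList (s.map (fun c => c.2))
      if rows.length = 1 then
        match PySem.List.max? cols (fun x => x) with
        | some mx =>
            match PySem.List.min? cols (fun x => x) with
            | some mn => decide (mx - mn = expected_size - 1)
            | none => false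
        | none => false
      else if cols.length = 1 then
        match PySem.List.max? rows (fun x => x) with
        | some mx =>
            match PySem.List.min? rows (fun x => x) with
            | some mn => decide (mx - mn = expected_size - 1)
            | none => false
        | none => false
      else false

-- ===== PRECONDITION & SPEC =====
def Spec_validate_ship_shape (coords : List (Int × Int)) (expected_size : Int) (out : Bool) : Prop := out = validate_ship_shape_alt coords expected_size
instance (coords : List (Int × Int)) (expected_size : Int) (out : Bool) : Decidable (Spec_validate_ship_shape coords expected_size out) := by unfold Spec_validate_ship_shape; infer_instance

-- ===== CLAIM (what is proved, stated in full; the proofs are below) =====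
def Claim_equal_validate_ship_shape : Prop := ∀ (coords : List (Int × Int)) (expected_size : Int), Dom_validate_ship_shape coords expected_size → Spec_validate_ship_shape coords expected_size (validate_ship_shape coords expected_size)

-- ===== LEMMAS AND PROOFS =====

-- sorted2 with integer keys is sorted with the lexicographic key (Int ×ₗ Int).
lemma sorted2_eq_sorted_lex (xs : List (Int × Int)) :
    PySem.List.sorted2 xs (fun c => c.1) (fun c => c.2) false
      = PySem.List.sorted xs (fun c => (toLex (c.1, c.2) : Lex (Int × Int))) false := by
  have h : ∀ a b : Int × Int,
      (decide (a.1 < b.1) || (!decide (b.1 < a.1) && decide (a.2 < b.2)))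
        = decide ((toLex (a.1, a.2) : Lex (Int × Int)) < toLex (b.1, b.2)) := by
    intro a b
    by_cases h1 : a.1 < b.1 <;> by_cases h2 : b.1 < a.1 <;> by_cases h3 : a.2 < b.2 <;>
      simp [h1, h2, h3, Prod.Lex.lt_iff] <;> omega
  unfold PySem.List.sorted2 PySem.List.sorted
  simp only [Bool.false_eq_true, if_false]
  congr 1
  funext acc x
  congr 1
  funext a b
  exact h a b

-- set() of a rearrangement is a rearrangement of set() (hence same length).
lemma ofList_perm_of_perm {α : Type} [BEq α] [LawfulBEq α] {l₁ l₂ : List α}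
    (h : l₁.Perm l₂) : (PySem.Set.ofList l₁).Perm (PySem.Set.ofList l₂) := by
  rw [List.perm_ext_iff_of_nodup (PySem.Set.nodup_ofList _) (PySem.Set.nodup_ofList _)]
  intro x
  simp [PySem.Set.mem_ofList, h.mem_iff]

-- min/max over lists with the same members agree (identity key).
lemma min?_id_congr {l₁ l₂ : List Int} (h : ∀ x, x ∈ l₁ ↔ x ∈ l₂) :
    PySem.List.min? l₁ (fun x => x) = PySem.List.min? l₂ (fun x => x) := by
  cases h₁ : PySem.List.min? l₁ (fun x => x) with
  | none =>
      rw [PySem.List.min?_eq_none_iff] at h₁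
      symm
      rw [PySem.List.min?_eq_none_iff, List.eq_nil_iff_forall_not_mem]
      intro x hx
      simp [h₁] at h
      exact h x hx
  | some m =>
      cases h₂ : PySem.List.min? l₂ (fun x => x) with
      | none =>
          rw [PySem.List.min?_eq_none_iff] at h₂
          have hmem := PySem.List.min?_mem h₁
          rw [h m] at hmem
          simp [h₂] at hmem
      | some m' =>
          have hm : m ∈ l₂ := (h m).1 (PySem.List.min?_mem h₁)
          have hm' : m' ∈ l₁ := (h m').2 (PySem.List.min?_mem h₂)
          have := PySem.List.min?_isMin h₁ m' hm'
          have := PySem.List.min?_isMin h₂ m hm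
          simp only [Option.some.injEq]
          omega

lemma max?_id_congr {l₁ l₂ : List Int} (h : ∀ x, x ∈ l₁ ↔ x ∈ l₂) :
    PySem.List.max? l₁ (fun x => x) = PySem.List.max? l₂ (fun x => x) := by
  cases h₁ : PySem.List.max? l₁ (fun x => x) with
  | none =>
      rw [PySem.List.max?_eq_none_iff] at h₁
      symm
      rw [PySem.List.max?_eq_none_iff, List.eq_nil_iff_forall_not_mem]
      intro x hx
      simp [h₁] at h
      exact h x hx
  | some m =>
      cases h₂ : PySem.List.max? l₂ (fun x => x) with
      | none =>
          rw [PySem.List.max?_eq_none_iff] at h₂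
          have hmem := PySem.List.max?_mem h₁
          rw [h m] at hmem
          simp [h₂] at hmem
      | some m' =>
          have hm : m ∈ l₂ := (h m).1 (PySem.List.max?_mem h₁)
          have hm' : m' ∈ l₁ := (h m').2 (PySem.List.max?_mem h₂)
          have := PySem.List.max?_isMax h₁ m' hm'
          have := PySem.List.max?_isMax h₂ m hm
          simp only [Option.some.injEq]
          omega

-- The crux: a strictly increasing integer list equals range(min, max+1)
-- exactly when its span is length - 1.
lemma strict_eq_range_iff {cols : List Int} {mn mx : Int}
    (hp : cols.Pairwise (· < ·))
    (hmn : PySem.List.min? cols (fun x => x) = some mn)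
    (hmx : PySem.List.max? cols (fun x => x) = some mx) :
    (cols = PySem.List.pyRange mn (mx + 1) 1) ↔ (mx - mn = (cols.length : Int) - 1) := by
  have hmnmem : mn ∈ cols := PySem.List.min?_mem hmn
  have hmxmem : mx ∈ cols := PySem.List.max?_mem hmx
  have hle : mn ≤ mx := PySem.List.min?_isMin hmn mx hmxmem
  constructor
  · intro hcols
    have := PySem.List.length_pyRange_one mn (mx + 1)
    rw [← hcols] at this
    omega
  · intro hspan
    have hnodc : cols.Nodup := hp.imp (fun h => ne_of_lt h)
    have hnodr : (PySem.List.pyRange mn (mx + 1) 1).Nodup := PySem.List.nodup_pyRange_one _ _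
    have hsub : ∀ x ∈ cols, x ∈ PySem.List.pyRange mn (mx + 1) 1 := by
      intro x hx
      rw [PySem.List.mem_pyRange_one]
      exact ⟨PySem.List.min?_isMin hmn x hx, by
        have := PySem.List.max?_isMax hmx x hx; omega⟩
    have hfsub : cols.toFinset ⊆ (PySem.List.pyRange mn (mx + 1) 1).toFinset := by
      intro x hx
      rw [List.mem_toFinset] at *
      exact hsub x hx
    have hcard : (PySem.List.pyRange mn (mx + 1) 1).toFinset.card ≤ cols.toFinset.card := by
      rw [List.toFinset_card_of_nodup hnodc, List.toFinset_card_of_nodup hnodr,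
        PySem.List.length_pyRange_one]
      omega
    have hfeq := Finset.eq_of_subset_of_card_le hfsub hcard
    have hperm : cols.Perm (PySem.List.pyRange mn (mx + 1) 1) := by
      rw [List.perm_ext_iff_of_nodup hnodc hnodr]
      intro x
      rw [← List.mem_toFinset, ← List.mem_toFinset (l := PySem.List.pyRange mn (mx + 1) 1), hfeq]
    exact List.Perm.eq_of_pairwise (fun a b _ _ h1 h2 => le_antisymm h1 h2)
      (hp.imp le_of_lt) ((PySem.List.pairwise_lt_pyRange_one mn (mx + 1)).imp le_of_lt) hperm

-- If set(l) has exactly one element then every two members of l are equal.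
lemma eq_of_ofList_length_one {l : List Int} (h : (PySem.Set.ofList l).length = 1)
    {x y : Int} (hx : x ∈ l) (hy : y ∈ l) : x = y := by
  obtain ⟨r, hr⟩ := List.length_eq_one_iff.mp h
  have hx' : x ∈ PySem.Set.ofList l := (PySem.Set.mem_ofList _ _).mpr hx
  have hy' : y ∈ PySem.Set.ofList l := (PySem.Set.mem_ofList _ _).mpr hy
  rw [hr, List.mem_singleton] at hx' hy'
  rw [hx', hy']

theorem validate_ship_shape_eq (coords : List (Int × Int)) (expected_size : Int) :
    validate_ship_shape coords expected_size = validate_ship_shape_alt coords expected_size := by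
  unfold validate_ship_shape validate_ship_shape_alt
  by_cases hlen : (coords.length : Int) ≠ expected_size
  · simp [hlen]
  · rw [if_neg hlen, if_neg hlen]
    by_cases hone : expected_size = 1
    · rw [if_pos hone, if_pos hone]
    · rw [if_neg hone, if_neg hone]
      set s := PySem.Set.ofList coords with hs
      set c2 := PySem.List.sorted2 s (fun c => c.1) (fun c => c.2) with hc2
      have hperm : c2.Perm s := PySem.List.sorted2_perm s _ _ false
      have hlen2 : c2.length = s.length := hperm.length_eq
      by_cases hsz : (s.length : Int) ≠ expected_size
      · rw [if_pos (show (c2.length : Int) ≠ expected_size by rw [hlen2]; exact hsz), if_pos hsz]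
      · rw [if_neg (show ¬(c2.length : Int) ≠ expected_size by rw [hlen2]; exact hsz), if_neg hsz]
        rw [not_not] at hsz
        show (if (PySem.Set.ofList (c2.map (fun c => c.1))).length = 1 then
            match PySem.List.min? (c2.map (fun c => c.2)) (fun x => x),
                PySem.List.max? (c2.map (fun c => c.2)) (fun x => x) with
            | some mn, some mx =>
                decide (c2.map (fun c => c.2) = PySem.List.pyRange mn (mx + 1) 1)
            | _, _ => false
          else if (PySem.Set.ofList (c2.map (fun c => c.2))).length = 1 then
            match PySem.List.min? (c2.map (fun c => c.1)) (fun x => x),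
                PySem.List.max? (c2.map (fun c => c.1)) (fun x => x) with
            | some mn, some mx =>
                decide (c2.map (fun c => c.1) = PySem.List.pyRange mn (mx + 1) 1)
            | _, _ => false
          else false)
          = (if (PySem.Set.ofList (s.map (fun c => c.1))).length = 1 then
            match PySem.List.max? (PySem.Set.ofList (s.map (fun c => c.2))) (fun x => x) with
            | some mx =>
                match PySem.List.min? (PySem.Set.ofList (s.map (fun c => c.2))) (fun x => x) with
                | some mn => decide (mx - mn = expected_size - 1)
                | none => false
            | none => false
          else if (PySem.Set.ofList (s.map (fun c => c.2))).length = 1 then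
            match PySem.List.max? (PySem.Set.ofList (s.map (fun c => c.1))) (fun x => x) with
            | some mx =>
                match PySem.List.min? (PySem.Set.ofList (s.map (fun c => c.1))) (fun x => x) with
                | some mn => decide (mx - mn = expected_size - 1)
                | none => false
            | none => false
          else false)
        have hnods : s.Nodup := PySem.Set.nodup_ofList coords
        have hnodc2 : c2.Nodup := hperm.symm.nodup hnods
        -- the projections have the same members on A's sorted list and B's set
        have hrmem : ∀ x, x ∈ c2.map (fun c => c.1) ↔ x ∈ PySem.Set.ofList (s.map (fun c => c.1)) := by
          intro x
          rw [PySem.Set.mem_ofList]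
          exact (hperm.map (fun c => c.1)).mem_iff
        have hcmem : ∀ x, x ∈ c2.map (fun c => c.2) ↔ x ∈ PySem.Set.ofList (s.map (fun c => c.2)) := by
          intro x
          rw [PySem.Set.mem_ofList]
          exact (hperm.map (fun c => c.2)).mem_iff
        have hrlen : (PySem.Set.ofList (c2.map (fun c => c.1))).length
            = (PySem.Set.ofList (s.map (fun c => c.1))).length :=
          (ofList_perm_of_perm (hperm.map _)).length_eq
        have hclen : (PySem.Set.ofList (c2.map (fun c => c.2))).length
            = (PySem.Set.ofList (s.map (fun c => c.2))).length :=
          (ofList_perm_of_perm (hperm.map _)).length_eq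
        -- c2 is sorted by the lexicographic key
        have hsorted : c2.Pairwise (fun a b => (toLex (a.1, a.2) : Lex (Int × Int)) ≤ toLex (b.1, b.2)) := by
          rw [hc2, sorted2_eq_sorted_lex]
          exact PySem.List.sorted_pairwise s _
        rw [← min?_id_congr hcmem, ← max?_id_congr hcmem,
            ← min?_id_congr hrmem, ← max?_id_congr hrmem]
        by_cases hrow : (PySem.Set.ofList (c2.map (fun c => c.1))).length = 1
        · rw [if_pos hrow,
            if_pos (show (PySem.Set.ofList (s.map (fun c => c.1))).length = 1 by
              rw [← hrlen]; exact hrow)]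
          -- all rows equal, so the columns of c2 are strictly increasing
          have hfst : ∀ a ∈ c2, ∀ b ∈ c2, a.1 = b.1 := by
            intro a ha b hb
            exact eq_of_ofList_length_one hrow (List.mem_map_of_mem ha) (List.mem_map_of_mem hb)
          have hpc : (c2.map (fun c => c.2)).Pairwise (· < ·) := by
            rw [List.pairwise_map]
            refine List.pairwise_iff_forall_sublist.mpr ?_
            intro a b hab
            have hmem := hab.subset
            have ha : a ∈ c2 := hmem (by simp)
            have hb : b ∈ c2 := hmem (by simp)
            have h1 : a ≠ b := List.pairwise_iff_forall_sublist.mp hnodc2 hab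
            have h2 : (toLex (a.1, a.2) : Lex (Int × Int)) ≤ toLex (b.1, b.2) :=
              List.pairwise_iff_forall_sublist.mp hsorted hab
            rw [Prod.Lex.le_iff] at h2
            have heq := hfst a ha b hb
            have hne : a.2 ≠ b.2 := fun hc => h1 (Prod.ext heq hc)
            simp at h2
            omega
          cases hmn : PySem.List.min? (c2.map (fun c => c.2)) (fun x => x) with
          | none =>
              cases hmx : PySem.List.max? (c2.map (fun c => c.2)) (fun x => x) <;> rfl
          | some mn =>
              cases hmx : PySem.List.max? (c2.map (fun c => c.2)) (fun x => x) with
              | none =>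
                  rfl
              | some mx =>
                  simp only [decide_eq_decide]
                  rw [strict_eq_range_iff hpc hmn hmx, List.length_map, hlen2, hsz]
        · rw [if_neg hrow,
            if_neg (show ¬(PySem.Set.ofList (s.map (fun c => c.1))).length = 1 by
              rw [← hrlen]; exact hrow)]
          by_cases hcol : (PySem.Set.ofList (c2.map (fun c => c.2))).length = 1
          · rw [if_pos hcol,
              if_pos (show (PySem.Set.ofList (s.map (fun c => c.2))).length = 1 by
                rw [← hclen]; exact hcol)]
            have hsnd : ∀ a ∈ c2, ∀ b ∈ c2, a.2 = b.2 := by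
              intro a ha b hb
              exact eq_of_ofList_length_one hcol (List.mem_map_of_mem ha) (List.mem_map_of_mem hb)
            have hpr : (c2.map (fun c => c.1)).Pairwise (· < ·) := by
              rw [List.pairwise_map]
              refine List.pairwise_iff_forall_sublist.mpr ?_
              intro a b hab
              have hmem := hab.subset
              have ha : a ∈ c2 := hmem (by simp)
              have hb : b ∈ c2 := hmem (by simp)
              have h1 : a ≠ b := List.pairwise_iff_forall_sublist.mp hnodc2 hab
              have h2 : (toLex (a.1, a.2) : Lex (Int × Int)) ≤ toLex (b.1, b.2) :=
                List.pairwise_iff_forall_sublist.mp hsorted hab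
              rw [Prod.Lex.le_iff] at h2
              have heq := hsnd a ha b hb
              have hne : a.1 ≠ b.1 := fun hc => h1 (Prod.ext hc heq)
              simp at h2
              omega
            cases hmn : PySem.List.min? (c2.map (fun c => c.1)) (fun x => x) with
            | none =>
                cases hmx : PySem.List.max? (c2.map (fun c => c.1)) (fun x => x) <;> rfl
            | some mn =>
                cases hmx : PySem.List.max? (c2.map (fun c => c.1)) (fun x => x) with
                | none =>
                    rfl
                | some mx =>
                    simp only [decide_eq_decide]
                    rw [strict_eq_range_iff hpr hmn hmx, List.length_map, hlen2, hsz]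
          · rw [if_neg hcol,
              if_neg (show ¬(PySem.Set.ofList (s.map (fun c => c.2))).length = 1 by
                rw [← hclen]; exact hcol)]

-- ===== VERDICT (by name: the statement is the Claim_ definition above) =====
theorem validate_ship_shape_spec : Claim_equal_validate_ship_shape := by
  intro coords expected_size _
  unfold Spec_validate_ship_shape
  exact validate_ship_shape_eq coords expected_size
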